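-- pv_equiv track=rewrite | github.com/mrauha/scripts4compchem | normie.py | grep_until_end_pattern
-- ===== SOURCE A (Python) =====
-- def grep_until_end_pattern(pattern, end_pattern, list_,ignore_n_init_rows=0,ignore_n_final_rows = 0):
--     r = []
--
--     for i, row in enumerate(list_):
--         if pattern in row:
--             newres = []
--             for j, subrow in enumerate(list_[i:]):
--                 newres.append(subrow)
--                 if end_pattern in subrow:
--                     break
--             newres = newres[ignore_n_init_rows:-ignore_n_final_rows]
--             r.append(newres)
--     return r
-- ===== SOURCE B (Python) =====
-- def grep_until_end_pattern(pattern, end_pattern, list_, ignore_n_init_rows=0, ignore_n_final_rows=0):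
--     n = len(list_)
--     next_end = [None] * n
--     nearest = None
--     for i in range(n - 1, -1, -1):
--         if end_pattern in list_[i]:
--             nearest = i
--         next_end[i] = nearest
--     r = []
--     for i, row in enumerate(list_):
--         if pattern in row:
--             block = list_[i:] if next_end[i] is None else list_[i:next_end[i] + 1]
--             r.append(block[ignore_n_init_rows:-ignore_n_final_rows])
--     return r
-- ===== Notes on version B (the rewrite author's own statement) =====
-- stated objective: alternative
-- what changed: B precomputes in one reverse pass a next_end table giving, for each index, the nearest row at-or-after it containing end_pattern, and then slices each block directly out of list_, instead of A's forward re-scan of the suffix for every matching row.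
import Mathlib
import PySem

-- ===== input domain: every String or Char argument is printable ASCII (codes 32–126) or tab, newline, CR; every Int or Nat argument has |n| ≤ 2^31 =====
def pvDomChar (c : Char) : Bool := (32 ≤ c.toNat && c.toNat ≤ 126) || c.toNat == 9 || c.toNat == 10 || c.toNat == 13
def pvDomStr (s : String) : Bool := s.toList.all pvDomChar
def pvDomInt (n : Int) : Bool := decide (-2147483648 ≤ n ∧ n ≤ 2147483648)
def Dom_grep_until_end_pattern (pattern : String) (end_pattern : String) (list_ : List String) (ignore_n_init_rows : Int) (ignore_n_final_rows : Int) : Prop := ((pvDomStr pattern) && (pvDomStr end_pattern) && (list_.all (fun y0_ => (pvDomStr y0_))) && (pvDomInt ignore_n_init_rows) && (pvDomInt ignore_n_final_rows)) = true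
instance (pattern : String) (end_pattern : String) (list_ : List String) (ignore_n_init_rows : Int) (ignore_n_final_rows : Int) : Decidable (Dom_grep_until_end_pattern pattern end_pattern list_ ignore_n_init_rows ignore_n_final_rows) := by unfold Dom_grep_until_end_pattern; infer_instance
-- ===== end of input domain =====

-- B precomputes, in one reverse pass, a table of the nearest end_pattern row at-or-after each index
-- and then slices each block directly out of list_, instead of A's per-match forward re-scan
-- (objective: alternative decomposition; same return value).

-- ===== PORT A =====
-- A's inner loop: append subrows of the suffix, breaking right after the first one containing end_pattern.
def pvCollectUntil (end_pattern : String) : List String → List String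
  | [] => []
  | subrow :: rest =>
      if PySem.Str.isIn end_pattern subrow then [subrow]
      else subrow :: pvCollectUntil end_pattern rest

def grep_until_end_pattern (pattern : String) (end_pattern : String) (list_ : List String) (ignore_n_init_rows : Int) (ignore_n_final_rows : Int) : List (List String) :=
  (PySem.List.enumerate list_ 0).foldl (fun r p =>
    if PySem.Str.isIn pattern p.2 then
      let newres := pvCollectUntil end_pattern (PySem.List.slice list_ (some p.1) none)
      r ++ [PySem.List.slice newres (some ignore_n_init_rows) (some (-ignore_n_final_rows))]
    else r) []

-- ===== PORT B =====
-- B's reverse pass: table whose entry i is the smallest index j ≥ i with end_pattern in list_[j] (none if no such j).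
def pvNextEnds (end_pattern : String) (list_ : List String) : List (Option Int) :=
  (PySem.List.enumerate list_ 0).foldr (fun p acc =>
    (if PySem.Str.isIn end_pattern p.2 then some p.1 else acc.headD none) :: acc) []

def grep_until_end_pattern_alt (pattern : String) (end_pattern : String) (list_ : List String) (ignore_n_init_rows : Int) (ignore_n_final_rows : Int) : List (List String) :=
  let next_end := pvNextEnds end_pattern list_
  (PySem.List.enumerate list_ 0).foldl (fun r p =>
    if PySem.Str.isIn pattern p.2 then
      let block := match PySem.List.pyGetD next_end p.1 none with
        | none => PySem.List.slice list_ (some p.1) none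
        | some j => PySem.List.slice list_ (some p.1) (some (j + 1))
      r ++ [PySem.List.slice block (some ignore_n_init_rows) (some (-ignore_n_final_rows))]
    else r) []

-- ===== PRECONDITION & SPEC =====
def Spec_grep_until_end_pattern (pattern : String) (end_pattern : String) (list_ : List String) (ignore_n_init_rows : Int) (ignore_n_final_rows : Int) (out : List (List String)) : Prop := out = grep_until_end_pattern_alt pattern end_pattern list_ ignore_n_init_rows ignore_n_final_rows
instance (pattern : String) (end_pattern : String) (list_ : List String) (ignore_n_init_rows : Int) (ignore_n_final_rows : Int) (out : List (List String)) : Decidable (Spec_grep_until_end_pattern pattern end_pattern list_ ignore_n_init_rows ignore_n_final_rows out) := by unfold Spec_grep_until_end_pattern; infer_instance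

-- ===== CLAIM (what is proved, stated in full; the proofs are below) =====
def Claim_equal_grep_until_end_pattern : Prop := ∀ (pattern : String) (end_pattern : String) (list_ : List String) (ignore_n_init_rows : Int) (ignore_n_final_rows : Int), Dom_grep_until_end_pattern pattern end_pattern list_ ignore_n_init_rows ignore_n_final_rows → Spec_grep_until_end_pattern pattern end_pattern list_ ignore_n_init_rows ignore_n_final_rows (grep_until_end_pattern pattern end_pattern list_ ignore_n_init_rows ignore_n_final_rows)

-- ===== LEMMAS AND PROOFS =====

-- A's collect-until-break, characterised by the index of the first end row.
theorem pvCollectUntil_eq (ep : String) (xs : List String) :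
    pvCollectUntil ep xs =
      match xs.findIdx? (fun s => PySem.Chars.isIn ep.toList s.toList) with
      | some j => xs.take (j + 1)
      | none => xs := by
  induction xs with
  | nil => simp [pvCollectUntil]
  | cons x xs ih =>
    simp only [pvCollectUntil, PySem.Str.isIn_eq, List.findIdx?_cons]
    by_cases h : PySem.Chars.isIn ep.toList x.toList = true
    · simp [h]
    · rw [if_neg h, if_neg h, ih]
      cases hf : xs.findIdx? (fun s => PySem.Chars.isIn ep.toList s.toList)
      · simp
      · simp

-- B's reverse-pass table, characterised entrywise (general start index for the induction).
theorem pvNextEnds_go (ep : String) (xs : List String) (s : Int) :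
    (PySem.List.enumerate xs s).foldr (fun p acc =>
        (if PySem.Str.isIn ep p.2 then some p.1 else acc.headD none) :: acc) [] =
      (List.range xs.length).map (fun k =>
        ((xs.drop k).findIdx? (fun r => PySem.Chars.isIn ep.toList r.toList)).map
          (fun j => s + k + j)) := by
  induction xs generalizing s with
  | nil => simp [PySem.List.enumerate]
  | cons x xs ih =>
    rw [PySem.List.enumerate_cons]
    simp only [List.foldr_cons, ih (s + 1)]
    rw [List.length_cons, List.range_succ_eq_map, List.map_cons, List.map_map]
    congr 1
    · -- head entry
      simp only [PySem.Str.isIn_eq, List.drop_zero, List.findIdx?_cons]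
      by_cases h : PySem.Chars.isIn ep.toList x.toList = true
      · simp [h]
      · rw [if_neg h, if_neg h]
        cases xs with
        | nil => simp
        | cons y ys =>
          rw [List.length_cons, List.range_succ_eq_map, List.map_cons, List.headD_cons]
          cases hf : (y :: ys).findIdx? (fun r => PySem.Chars.isIn ep.toList r.toList)
          · simp [hf]
          · simp [hf]
            omega
    · -- tail entries
      apply List.map_congr_left
      intro k _
      simp only [Function.comp, List.drop_succ_cons]
      cases hf : (xs.drop k).findIdx? (fun r => PySem.Chars.isIn ep.toList r.toList)
      · simp
      · simp
        omega

theorem pvNextEnds_getD (ep : String) (list_ : List String) (k : Nat) (hk : k < list_.length) :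
    (pvNextEnds ep list_).getD k none =
      ((list_.drop k).findIdx? (fun r => PySem.Chars.isIn ep.toList r.toList)).map
        (fun j => ((k + j : Nat) : Int)) := by
  unfold pvNextEnds
  rw [pvNextEnds_go]
  rw [List.getD_eq_getElem?_getD, List.getElem?_map, List.getElem?_range hk]
  cases hf : (list_.drop k).findIdx? (fun r => PySem.Chars.isIn ep.toList r.toList)
  · simp [hf]
  · simp [hf]

-- The block A collects for a match at index k equals the block B slices out via the table.
theorem pvBlock_eq (ep : String) (list_ : List String) (k : Nat) (hk : k < list_.length) :
    pvCollectUntil ep (PySem.List.slice list_ (some ((0 : Int) + k)) none) =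
      (match PySem.List.pyGetD (pvNextEnds ep list_) ((0 : Int) + k) none with
        | none => PySem.List.slice list_ (some ((0 : Int) + k)) none
        | some j => PySem.List.slice list_ (some ((0 : Int) + k)) (some (j + 1))) := by
  have h0 : ((0 : Int) + k) = ((k : Nat) : Int) := by omega
  rw [h0, PySem.List.slice_from_natCast, PySem.List.pyGetD_natCast,
    pvNextEnds_getD ep list_ k hk, pvCollectUntil_eq]
  cases hf : (list_.drop k).findIdx? (fun r => PySem.Chars.isIn ep.toList r.toList) with
  | none => simp
  | some j =>
    simp only [Option.map_some]
    have hj : ((k + j : Nat) : Int) + 1 = ((k + j + 1 : Nat) : Int) := by push_cast; ring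
    rw [hj, PySem.List.slice_natCast]
    congr 1
    omega

-- ===== VERDICT (by name: the statement is the Claim_ definition above) =====
theorem grep_until_end_pattern_spec : Claim_equal_grep_until_end_pattern := by
  intro pattern end_pattern list_ init fin _
  unfold Spec_grep_until_end_pattern grep_until_end_pattern grep_until_end_pattern_alt
  apply PySem.List.foldl_congr_mem
  intro acc p hp
  rcases (PySem.List.mem_enumerate_iff list_ 0 p).1 hp with ⟨k, hk, rfl⟩
  simp only [PySem.Str.isIn_eq]
  by_cases hpat : PySem.Chars.isIn pattern.toList list_[k].toList = true
  · rw [if_pos hpat, if_pos hpat, pvBlock_eq end_pattern list_ k hk]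
  · rw [if_neg hpat, if_neg hpat]
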